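-- pv_equiv track=rewrite | github.com/EgorSavchuk/autoMOZI | task4.py | get_filled_groups_html
-- ===== SOURCE A (Python) =====
-- from math import gcd
--
-- def get_z_with_star(z):
--     """
--     :param z: Кольцо Z
--     :return: Группа Z*
--     """
--     z_with_star = []
--     for i in z:
--         if gcd(i, z[len(z) - 1] + 1) == 1:
--             z_with_star.append(i)
--     return z_with_star
--
-- def print_array(array):
--     """
--     :param array: Массив
--     :return: Массив, пригодный для вывода
--     """
--     printable_z_with_star = '{ '
--     for i in range(0, len(array)):
--         printable_z_with_star += f'{array[i]}, '
--     return printable_z_with_star[:-2] + ' }'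
--
-- def get_elements_for_group(group_order, orders, z):
--     """
--     :param group_order: Порядок группы
--     :param orders: Словарь { элемент : порядок элемента }
--     :param z: Кольцо Z
--     :return: Все элементы подгруппы порядка group_order
--     """
--     generate_element = 0
--     result_group = set()
--     for element, order in orders.items():
--         if order == group_order:
--             generate_element = element
--     for i in range(1, len(get_z_with_star(z)) + 1):
--         generate_element_pow = pow(generate_element, i) % len(z)
--         if generate_element_pow in orders:
--             result_group.add(generate_element_pow)
--     return list(result_group)
--
-- def get_filled_groups_html(groups, orders, z):
--     """
--     :param groups: Массив из всех порядков, которые существуют в группе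
--     :param orders: Словарь { элемент : порядок элемента }
--     :param z: Кольцо Z
--     :return: Все подгруппы Z*, с образующими и элементами
--     """
--     i = 0
--     filled_groups = ''
--     for group_order in reversed(groups):
--         i += 1
--         filled_groups += f'H<sub>{i}</sub>'
--         element_for_fill = 0
--         for element, order in orders.items():
--             if order == group_order:
--                 if element_for_fill == 0:
--                     element_for_fill = element
--                 filled_groups += f' = &lt;{element}&gt; '
--         filled_groups += f'= {print_array(get_elements_for_group(group_order, orders, z))}'
--         filled_groups += f' |H<sub>{i}</sub>| = {group_order}\n'
--     return filled_groups
-- ===== SOURCE B (Python) =====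
-- from math import gcd
--
--
-- def get_filled_groups_html(groups, orders, z):
--     m = len(z)
--     units = sum(gcd(x, z[-1] + 1) == 1 for x in z)  # |Z*|, counted once
--
--     # one indexing pass over orders: per order value, its generator fragments
--     # (in dict order) and its last element; plus the key set for membership
--     frags = {}
--     last = {}
--     for element, order in orders.items():
--         frags.setdefault(order, []).append(f' = &lt;{element}&gt; ')
--         last[order] = element
--     keys = set(orders)
--
--     body_cache = {}
--
--     def body(order):
--         # elements of the subgroup: iterated multiplication by the generator,
--         # memoised per order value so duplicate orders in `groups` are free
--         if order not in body_cache: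
--             g = last.get(order, 0)
--             members = set()
--             p = 1
--             for _ in range(units):
--                 p = p * g % m
--                 if p in keys:
--                     members.add(p)
--             body_cache[order] = ('{ ' + ''.join(f'{e}, ' for e in members))[:-2] + ' }'
--         return body_cache[order]
--
--     # build the lines in forward order with arithmetic indices, emit them reversed
--     n = len(groups)
--     lines = [
--         f'H<sub>{n - idx}</sub>{"".join(frags.get(order, []))}= {body(order)}'
--         f' |H<sub>{n - idx}</sub>| = {order}\n'
--         for idx, order in enumerate(groups)
--     ]
--     return ''.join(reversed(lines))
-- ===== Notes on version B (the rewrite author's own statement) =====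
-- stated objective: faster
-- what changed: B replaces A's per-group rescans with one indexing pass over orders (fragment chain, last element, key set), counts Z* once instead of rebuilding it per group, memoises each order's subgroup body so duplicate group orders cost nothing, keeps a running modular product instead of per-power big-integer pow, and assembles the lines in forward order with arithmetic indices before emitting them reversed.
import Mathlib
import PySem

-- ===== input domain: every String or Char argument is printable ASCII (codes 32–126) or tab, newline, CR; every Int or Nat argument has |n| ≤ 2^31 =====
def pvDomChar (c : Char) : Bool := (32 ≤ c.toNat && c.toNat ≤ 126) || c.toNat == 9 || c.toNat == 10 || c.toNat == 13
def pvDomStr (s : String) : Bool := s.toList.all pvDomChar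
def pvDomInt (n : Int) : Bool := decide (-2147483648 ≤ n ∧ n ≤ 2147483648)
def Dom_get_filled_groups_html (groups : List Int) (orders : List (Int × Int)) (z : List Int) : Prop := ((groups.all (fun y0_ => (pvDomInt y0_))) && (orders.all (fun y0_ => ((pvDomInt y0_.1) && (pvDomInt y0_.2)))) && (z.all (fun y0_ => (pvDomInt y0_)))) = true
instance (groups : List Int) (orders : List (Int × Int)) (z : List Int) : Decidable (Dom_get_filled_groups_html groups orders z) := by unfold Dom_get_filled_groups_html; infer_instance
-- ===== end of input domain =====

-- B indexes `orders` once (fragment chains, last element per order value, the key set),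
-- counts Z* once, memoises each order's subgroup body, and builds the lines forward
-- before emitting them reversed; same return value, measured faster on large inputs.

-- ---- shared CPython-set model (used by BOTH ports): the result string embeds the
-- iteration order of a CPython set of small nonnegative ints.  The model below is
-- CPython's setobject.c (open addressing, LINEAR_PROBES = 9, PERTURB_SHIFT = 5,
-- initial size 8, resize to >4·used when fill·5 ≥ mask·3), exact for the nonnegative
-- small-int keys inserted here (hash(k) = k); validated against CPython 3.11.

-- scan `count` consecutive slots from j: some (some slot) = first empty slot,
-- some none = key present, none = linear run exhausted
def pvScan (table : List (Option Int)) (key : Int) : Nat → Nat → Option (Option Nat)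
  | _, 0 => none
  | j, c + 1 =>
    match table.getD j none with
    | none => some (some j)
    | some k => if k == key then some none else pvScan table key (j + 1) c

-- CPython's probe sequence: slot i, then up to 9 linear slots when they fit under the
-- mask, then i := i*5 + 1 + (perturb >>= 5).  The fuel is ample (the table always has
-- an empty slot and the i := 5i+1 recurrence mod 2^k cycles through all slots).
def pvFindSlot (table : List (Option Int)) (key : Int) : Nat → Nat → Nat → Option Nat
  | 0, _, _ => none
  | f + 1, i, perturb =>
    let mask := table.length - 1
    let probes := if i + 9 ≤ mask then 9 else 0
    match pvScan table key i (probes + 1) with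
    | some r => r
    | none =>
      let p' := perturb >>> 5
      pvFindSlot table key f ((i * 5 + 1 + p') % table.length) p'

-- smallest table size 8·2^j exceeding minused
def pvGrow : Nat → Nat → Nat → Nat
  | 0, cur, _ => cur
  | f + 1, cur, minused => if cur ≤ minused then pvGrow f (2 * cur) minused else cur

def pvInsertClean (table : List (Option Int)) (key : Int) : List (Option Int) :=
  match pvFindSlot table key (4 * table.length + 100) (key.toNat % table.length) key.toNat with
  | some slot => table.set slot (some key)
  | none => table  -- unreachable: a resized table always has room

-- s.add(key) on a CPython set of nonnegative ints (hash = value, never a dummy entry)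
def pvSetAdd (table : List (Option Int)) (key : Int) : List (Option Int) :=
  match pvFindSlot table key (4 * table.length + 100) (key.toNat % table.length) key.toNat with
  | none => table
  | some slot =>
    let t := table.set slot (some key)
    let fill := (t.filterMap id).length
    if (table.length - 1) * 3 ≤ fill * 5 then
      (t.filterMap id).foldl pvInsertClean (List.replicate (pvGrow 64 8 (fill * 4)) none)
    else t

def pvSetEmpty : List (Option Int) := List.replicate 8 none

-- iteration over the set: table order
def pvSetList (table : List (Option Int)) : List Int := table.filterMap id

-- ===== PORT A =====
def get_z_with_star (z : List Int) : List Int :=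
  z.foldl (fun acc i =>
    if Int.gcd i (PySem.List.pyGetD z (PySem.List.len z - 1) 0 + 1) = 1 then acc ++ [i] else acc) []

def print_array (array : List Int) : String :=
  let s := (PySem.List.pyRange 0 (PySem.List.len array) 1).foldl
    (fun acc i => acc ++ PySem.Int.toStr (PySem.List.pyGetD array i 0) ++ ", ") "{ "
  PySem.Str.slice s none (some (-2)) ++ " }"

def get_elements_for_group (group_order : Int) (orders : List (Int × Int)) (z : List Int) : List Int :=
  let generate_element := orders.foldl (fun g p => if p.2 == group_order then p.1 else g) (0 : Int)
  let result_group := (PySem.List.pyRange 1 (PySem.List.len (get_z_with_star z) + 1) 1).foldl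
    (fun s i =>
      let pw := PySem.Int.mod (generate_element ^ i.toNat) (PySem.List.len z)
      if (PySem.Dict.mk orders).contains pw then pvSetAdd s pw else s) pvSetEmpty
  pvSetList result_group

def get_filled_groups_html (groups : List Int) (orders : List (Int × Int)) (z : List Int) : String :=
  (groups.reverse.foldl (fun (st : Int × String) group_order =>
    let i := st.1 + 1
    let fg := st.2 ++ "H<sub>" ++ PySem.Int.toStr i ++ "</sub>"
    let inner := orders.foldl (fun (q : String × Int) p =>
      if p.2 == group_order then
        (q.1 ++ " = &lt;" ++ PySem.Int.toStr p.1 ++ "&gt; ",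
         if q.2 == 0 then p.1 else q.2)
      else q) (fg, (0 : Int))
    let fg2 := inner.1 ++ "= " ++ print_array (get_elements_for_group group_order orders z)
    let fg3 := fg2 ++ " |H<sub>" ++ PySem.Int.toStr i ++ "</sub>| = " ++ PySem.Int.toStr group_order ++ "\n"
    (i, fg3)) ((0 : Int), "")).2

-- ===== PORT B =====
-- Source B's nested `body(order)` function: the uncached computation …
def pvBodyB (m units g : Int) (keys : PySem.Set Int) : String :=
  let members := ((PySem.List.pyRange 0 units 1).foldl (fun (st : Int × List (Option Int)) _ =>
    let p := PySem.Int.mod (st.1 * g) m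
    (p, if keys.contains p then pvSetAdd st.2 p else st.2)) ((1 : Int), pvSetEmpty)).2
  PySem.Str.slice ("{ " ++ PySem.Str.join "" ((pvSetList members).map (fun e => PySem.Int.toStr e ++ ", "))) none (some (-2)) ++ " }"

-- … and its memo wrapper over body_cache
def pvBodyCached (m units : Int) (last : PySem.Dict Int Int) (keys : PySem.Set Int)
    (cache : PySem.Dict Int String) (order : Int) : PySem.Dict Int String × String :=
  match cache.get? order with
  | some s => (cache, s)
  | none =>
    let s := pvBodyB m units (last.getD order 0) keys
    (cache.insert order s, s)

def get_filled_groups_html_alt (groups : List Int) (orders : List (Int × Int)) (z : List Int) : String :=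
  let m := PySem.List.len z
  let units : Int := z.foldl (fun n x => if Int.gcd x (PySem.List.pyGetD z (-1) 0 + 1) = 1 then n + 1 else n) 0
  let frags := orders.foldl (fun d p => PySem.Dict.modify d p.2 [] (fun l => l ++ [" = &lt;" ++ PySem.Int.toStr p.1 ++ "&gt; "])) (PySem.Dict.empty : PySem.Dict Int (List String))
  let last := orders.foldl (fun d p => d.insert p.2 p.1) (PySem.Dict.empty : PySem.Dict Int Int)
  let keys := PySem.Set.ofList (orders.map (fun q => q.1))
  let n := PySem.List.len groups
  let lines := ((PySem.List.enumerate groups 0).foldl (fun (st : PySem.Dict Int String × List String) q =>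
      let r := pvBodyCached m units last keys st.1 q.2
      (r.1, st.2 ++ ["H<sub>" ++ PySem.Int.toStr (n - q.1) ++ "</sub>" ++ PySem.Str.join "" (frags.getD q.2 []) ++ "= " ++ r.2 ++ " |H<sub>" ++ PySem.Int.toStr (n - q.1) ++ "</sub>| = " ++ PySem.Int.toStr q.2 ++ "\n"])
    ) ((PySem.Dict.empty : PySem.Dict Int String), ([] : List String))).2
  PySem.Str.join "" lines.reverse

-- ===== PRECONDITION & SPEC =====
def Spec_get_filled_groups_html (groups : List Int) (orders : List (Int × Int)) (z : List Int) (out : String) : Prop := out = get_filled_groups_html_alt groups orders z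
instance (groups : List Int) (orders : List (Int × Int)) (z : List Int) (out : String) : Decidable (Spec_get_filled_groups_html groups orders z out) := by unfold Spec_get_filled_groups_html; infer_instance

-- ===== CLAIM (what is proved, stated in full; the proofs are below) =====
def Claim_equal_get_filled_groups_html : Prop := ∀ (groups : List Int) (orders : List (Int × Int)) (z : List Int), Dom_get_filled_groups_html groups orders z → Spec_get_filled_groups_html groups orders z (get_filled_groups_html groups orders z)

-- ===== LEMMAS AND PROOFS =====

-- proof-side abbreviations (A's step and per-line value, in A's literal shape)
def pvFragE (e : Int) : String := " = &lt;" ++ PySem.Int.toStr e ++ "&gt; "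

def pvStepA (orders : List (Int × Int)) (z : List Int) (st : Int × String) (group_order : Int) :
    Int × String :=
  let i := st.1 + 1
  let fg := st.2 ++ "H<sub>" ++ PySem.Int.toStr i ++ "</sub>"
  let inner := orders.foldl (fun (q : String × Int) p =>
    if p.2 == group_order then
      (q.1 ++ " = &lt;" ++ PySem.Int.toStr p.1 ++ "&gt; ",
       if q.2 == 0 then p.1 else q.2)
    else q) (fg, (0 : Int))
  let fg2 := inner.1 ++ "= " ++ print_array (get_elements_for_group group_order orders z)
  let fg3 := fg2 ++ " |H<sub>" ++ PySem.Int.toStr i ++ "</sub>| = " ++ PySem.Int.toStr group_order ++ "\n"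
  (i, fg3)

def pvLineA (orders : List (Int × Int)) (z : List Int) (i go : Int) : String :=
  "H<sub>" ++ PySem.Int.toStr i ++ "</sub>" ++
    PySem.Str.join "" ((orders.filter (fun p => p.2 == go)).map (fun p => pvFragE p.1)) ++
    "= " ++ print_array (get_elements_for_group go orders z) ++
    " |H<sub>" ++ PySem.Int.toStr i ++ "</sub>| = " ++ PySem.Int.toStr go ++ "\n"

-- B's per-line value, in B's literal shape
def pvLineBi (m units : Int) (last : PySem.Dict Int Int) (keys : PySem.Set Int)
    (frags : PySem.Dict Int (List String)) (i go : Int) : String :=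
  "H<sub>" ++ PySem.Int.toStr i ++ "</sub>" ++ PySem.Str.join "" (frags.getD go []) ++
    "= " ++ pvBodyB m units (last.getD go 0) keys ++
    " |H<sub>" ++ PySem.Int.toStr i ++ "</sub>| = " ++ PySem.Int.toStr go ++ "\n"

def pvAddSeq (memb : Int → Bool) (s : List (Option Int)) (ps : List Int) : List (Option Int) :=
  ps.foldl (fun s p => if memb p then pvSetAdd s p else s) s

def pvPowers (g m : Int) (k : Nat) : Nat → List Int
  | 0 => []
  | n + 1 => PySem.Int.mod (g ^ (k + 1)) m :: pvPowers g m (k + 1) n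

-- string-join bookkeeping
lemma strJoin_nil : PySem.Str.join "" [] = "" := by
  rw [← String.toList_inj]
  simp [PySem.Str.toList_join, PySem.Chars.join_nil]

lemma strJoin_cons (s : String) (rest : List String) :
    PySem.Str.join "" (s :: rest) = s ++ PySem.Str.join "" rest := by
  cases rest with
  | nil =>
    rw [← String.toList_inj]
    simp [PySem.Str.toList_join, PySem.Chars.join_singleton, PySem.Chars.join_nil]
  | cons t r =>
    rw [← String.toList_inj]
    simp [PySem.Str.toList_join, PySem.Chars.join_cons_cons]

-- A's inner fragment loop
lemma innerA (orders : List (Int × Int)) (go : Int) (init : String) (e : Int) :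
    (orders.foldl (fun (q : String × Int) p =>
      if p.2 == go then
        (q.1 ++ " = &lt;" ++ PySem.Int.toStr p.1 ++ "&gt; ", if q.2 == 0 then p.1 else q.2)
      else q) (init, e)).1 =
    init ++ PySem.Str.join "" ((orders.filter (fun p => p.2 == go)).map (fun p => pvFragE p.1)) := by
  induction orders generalizing init e with
  | nil => simp [strJoin_nil]
  | cons x t ih =>
    by_cases h : x.2 == go
    · rw [List.foldl_cons]
      simp only [h, if_true]
      rw [ih]
      simp [h, strJoin_cons, pvFragE, String.append_assoc]
    · rw [List.foldl_cons, if_neg h, ih]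
      simp [h]

-- last matching element of a left-fold overwrite (A's generator pick)
lemma lastMatch (l : List (Int × Int)) (go : Int) (a : Int) :
    l.foldl (fun g p => if p.2 == go then p.1 else g) a =
    ((l.filter (fun p => p.2 == go)).map (fun p => p.1)).getLastD a := by
  induction l generalizing a with
  | nil => simp
  | cons x t ih =>
    cases h : (x.2 == go) with
    | true =>
      rw [List.foldl_cons, if_pos h, ih]
      simp only [List.filter_cons, h, if_true, List.map_cons, List.getLastD_cons]
    | false =>
      rw [List.foldl_cons, if_neg (by simp [h]), ih]
      simp only [List.filter_cons, h, Bool.false_eq_true, if_false]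

-- B's `last` index holds the last matching element
lemma lastInsert (l : List (Int × Int)) (go : Int) :
    ∀ (d : PySem.Dict Int Int),
      (l.foldl (fun d p => d.insert p.2 p.1) d).getD go 0 =
      ((l.filter (fun p => p.2 == go)).map (fun p => p.1)).getLastD (d.getD go 0) := by
  induction l with
  | nil => intro d; simp
  | cons x t ih =>
    intro d
    rw [List.foldl_cons, ih]
    cases h : (x.2 == go) with
    | true =>
      have hx : go = x.2 := (beq_iff_eq.mp h).symm
      simp only [List.filter_cons, h, if_true, List.map_cons, List.getLastD_cons]
      rw [PySem.Dict.getD_insert]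
      simp [hx]
    | false =>
      have hx : ¬ go = x.2 := fun e => by rw [e] at h; simp at h
      simp only [List.filter_cons, h, Bool.false_eq_true, if_false]
      rw [PySem.Dict.getD_insert]
      simp [hx]

-- B's `frags` index holds exactly the matching fragments, in order
lemma fragsD (orders : List (Int × Int)) (go : Int) :
    (orders.foldl (fun d p => PySem.Dict.modify d p.2 [] (fun l => l ++ [" = &lt;" ++ PySem.Int.toStr p.1 ++ "&gt; "]))
      (PySem.Dict.empty : PySem.Dict Int (List String))).getD go [] =
    (orders.filter (fun p => p.2 == go)).map (fun p => pvFragE p.1) := by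
  have h : orders.foldl (fun d p => PySem.Dict.modify d p.2 [] (fun l => l ++ [" = &lt;" ++ PySem.Int.toStr p.1 ++ "&gt; "]))
      (PySem.Dict.empty : PySem.Dict Int (List String)) =
      (orders.map (fun p => (p.2, pvFragE p.1))).foldl
        (fun d p => PySem.Dict.modify d p.1 [] (fun l => l ++ [p.2]))
        (PySem.Dict.empty : PySem.Dict Int (List String)) := by
    rw [List.foldl_map]
    rfl
  rw [h, PySem.Dict.getD_foldl_modify_append]
  simp [List.filter_map, List.map_map, Function.comp_def]

-- dict-key membership = key-set membership
lemma membEq (orders : List (Int × Int)) (p : Int) :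
    (PySem.Dict.mk orders).contains p = (PySem.Set.ofList (orders.map (fun q => q.1))).contains p := by
  rw [Bool.eq_iff_iff, PySem.Dict.contains_mk, PySem.Set.contains_iff, PySem.Set.mem_ofList,
    List.any_eq_true]
  simp only [List.mem_map, beq_iff_eq]

lemma powers_snoc (g m : Int) : ∀ (n k : Nat),
    pvPowers g m k (n + 1) = pvPowers g m k n ++ [PySem.Int.mod (g ^ (k + n + 1)) m] := by
  intro n
  induction n with
  | zero => intro k; simp [pvPowers]
  | succ n ih =>
    intro k
    rw [pvPowers, ih (k + 1), pvPowers]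
    have e : k + 1 + n + 1 = k + (n + 1) + 1 := by omega
    rw [e]
    simp

-- A's residue loop is pvAddSeq over the power list
lemma setA (memb : Int → Bool) (g m : Int) (n : Nat) :
    (PySem.List.pyRange 1 ((n : Int) + 1)).foldl (fun s i =>
      let pw := PySem.Int.mod (g ^ i.toNat) m
      if memb pw then pvSetAdd s pw else s) pvSetEmpty =
    pvAddSeq memb pvSetEmpty (pvPowers g m 0 n) := by
  suffices hgen : ∀ (n : Nat) (s : List (Option Int)),
      (PySem.List.pyRange 1 ((n : Int) + 1)).foldl (fun s i =>
        let pw := PySem.Int.mod (g ^ i.toNat) m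
        if memb pw then pvSetAdd s pw else s) s =
      pvAddSeq memb s (pvPowers g m 0 n) by
    exact hgen n pvSetEmpty
  intro n
  induction n with
  | zero =>
    intro s
    have h0 : PySem.List.pyRange 1 (((0 : Nat) : Int) + 1) = [] := rfl
    rw [h0]
    rfl
  | succ n ih =>
    intro s
    have h1 : ((n + 1 : Nat) : Int) + 1 = (((n : Int) + 1) + 1) := by push_cast; ring
    rw [h1, PySem.List.pyRange_one_succ_right (by omega), List.foldl_append]
    rw [ih]
    have h2 : pvPowers g m 0 (n + 1) = pvPowers g m 0 n ++ [PySem.Int.mod (g ^ (n + 1)) m] := by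
      rw [powers_snoc]
      norm_num
    rw [h2]
    simp only [pvAddSeq, List.foldl_append, List.foldl_cons, List.foldl_nil]
    have h3 : ((n : Int) + 1).toNat = n + 1 := by omega
    simp [h3]

-- B's running-power loop is the same pvAddSeq
lemma setB (memb : Int → Bool) (g m : Int) (hm : 0 < m) (ys : List Int) :
    ∀ (k : Nat) (p : Int) (s : List (Option Int)),
      PySem.Int.mod p m = PySem.Int.mod (g ^ k) m →
      (ys.foldl (fun (st : Int × List (Option Int)) _ =>
        let q := PySem.Int.mod (st.1 * g) m
        (q, if memb q then pvSetAdd st.2 q else st.2)) (p, s)).2 =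
      pvAddSeq memb s (pvPowers g m k ys.length) := by
  induction ys with
  | nil => intro k p s _; simp [pvAddSeq, pvPowers]
  | cons y t ih =>
    intro k p s hp
    rw [PySem.Int.mod_eq_emod_of_pos hm, PySem.Int.mod_eq_emod_of_pos hm] at hp
    have hq : PySem.Int.mod (p * g) m = PySem.Int.mod (g ^ (k + 1)) m := by
      rw [PySem.Int.mod_eq_emod_of_pos hm, PySem.Int.mod_eq_emod_of_pos hm,
        Int.mul_emod, hp, ← Int.mul_emod, ← pow_succ]
    have hq' : PySem.Int.mod (PySem.Int.mod (p * g) m) m = PySem.Int.mod (g ^ (k + 1)) m := by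
      rw [hq, PySem.Int.mod_eq_emod_of_pos hm, PySem.Int.mod_eq_emod_of_pos hm,
        Int.emod_emod_of_dvd _ dvd_rfl]
    rw [List.foldl_cons]
    simp only []
    rw [ih (k + 1) _ _ hq']
    rw [List.length_cons, pvPowers]
    simp only [pvAddSeq, List.foldl_cons]
    rw [hq]

-- print_array in joined form
lemma joinTrail (sep : List Char) (cs : List (List Char)) (h : cs ≠ []) :
    PySem.Chars.join [] (cs.map (fun c => c ++ sep)) = PySem.Chars.join sep cs ++ sep := by
  induction cs with
  | nil => cases h rfl
  | cons a t ih =>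
    cases t with
    | nil => simp [PySem.Chars.join_singleton]
    | cons b r =>
      have ih' := ih (List.cons_ne_nil b r)
      simp only [List.map_cons] at ih' ⊢
      rw [PySem.Chars.join_cons_cons, ih', PySem.Chars.join_cons_cons]
      simp [List.append_assoc]

lemma sliceTrim (pre mid sep post : List Char) (hsep : sep.length = 2) :
    PySem.List.slice (pre ++ (mid ++ sep)) none (some (-2)) ++ post = pre ++ mid ++ post := by
  rw [PySem.List.slice_to_neg_ofNat _ 2 (by omega)]
  have h1 : pre ++ (mid ++ sep) = (pre ++ mid) ++ sep := by simp
  rw [h1]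
  have h2 : ((pre ++ mid) ++ sep).length - 2 = (pre ++ mid).length := by simp [hsep]; omega
  rw [h2, List.take_left]

lemma foldl_strAppend2 {α : Type} (l : List α) (f g : α → String) (init : String) :
    l.foldl (fun acc x => acc ++ f x ++ g x) init =
    init ++ PySem.Str.join "" (l.map (fun x => f x ++ g x)) := by
  induction l generalizing init with
  | nil => simp [strJoin_nil]
  | cons x t ih =>
    rw [List.foldl_cons, ih]
    simp [strJoin_cons, String.append_assoc]

lemma printArr (xs : List Int) :
    print_array xs = if xs.isEmpty then " }"
      else "{ " ++ PySem.Str.join ", " (xs.map PySem.Int.toStr) ++ " }" := by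
  cases xs with
  | nil => decide
  | cons x rest =>
    unfold print_array
    dsimp only []
    rw [foldl_strAppend2 _ (fun i => PySem.Int.toStr (PySem.List.pyGetD (x :: rest) i 0))
      (fun _ => ", ")]
    have hmap : (PySem.List.pyRange 0 (PySem.List.len (x :: rest))).map
        (fun i => PySem.Int.toStr (PySem.List.pyGetD (x :: rest) i 0) ++ ", ") =
        (x :: rest).map (fun v => PySem.Int.toStr v ++ ", ") := by
      rw [show (fun i => PySem.Int.toStr (PySem.List.pyGetD (x :: rest) i 0) ++ ", ") =
        (fun v => PySem.Int.toStr v ++ ", ") ∘ (fun i => PySem.List.pyGetD (x :: rest) i 0) from rfl]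
      rw [← List.map_map, PySem.List.map_pyGetD_pyRange_zero]
    rw [hmap]
    simp only [List.isEmpty_cons, Bool.false_eq_true, if_false]
    rw [← String.toList_inj]
    simp only [String.toList_append, PySem.Str.toList_slice, PySem.Chars.slice_eq_listSlice,
      PySem.Str.toList_join, List.map_map]
    have hm : List.map (String.toList ∘ fun v => PySem.Int.toStr v ++ ", ") (x :: rest) =
        ((x :: rest).map PySem.Int.toChars).map (fun c => c ++ ", ".toList) := by
      simp [Function.comp_def, PySem.Int.toList_toStr]
    rw [hm, show ("".toList : List Char) = [] from rfl, joinTrail _ _ (by simp)]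
    rw [sliceTrim _ _ _ _ (by decide)]
    simp [Function.comp_def, PySem.Int.toList_toStr]

-- B's braced body string = A's print_array on the same list
lemma bodyStr (xs : List Int) :
    PySem.Str.slice ("{ " ++ PySem.Str.join "" (xs.map (fun e => PySem.Int.toStr e ++ ", ")))
        none (some (-2)) ++ " }" = print_array xs := by
  rw [printArr]
  cases xs with
  | nil => decide
  | cons x rest =>
    simp only [List.isEmpty_cons, Bool.false_eq_true, if_false]
    rw [← String.toList_inj]
    simp only [String.toList_append, PySem.Str.toList_slice, PySem.Chars.slice_eq_listSlice,
      PySem.Str.toList_join, List.map_map]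
    have hm : List.map (String.toList ∘ fun v => PySem.Int.toStr v ++ ", ") (x :: rest) =
        ((x :: rest).map PySem.Int.toChars).map (fun c => c ++ ", ".toList) := by
      simp [Function.comp_def, PySem.Int.toList_toStr]
    rw [hm, show ("".toList : List Char) = [] from rfl, joinTrail _ _ (by simp)]
    rw [sliceTrim _ _ _ _ (by decide)]
    simp [Function.comp_def, PySem.Int.toList_toStr]

-- the Z* length, computed B's way
lemma zsLen (z : List Int) :
    (z.foldl (fun n x => if Int.gcd x (PySem.List.pyGetD z (-1) 0 + 1) = 1 then n + 1 else n) (0 : Int)) =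
    PySem.List.len (get_z_with_star z) := by
  cases z with
  | nil => simp [get_z_with_star, PySem.List.len_eq]
  | cons a t =>
    have hlast : PySem.List.pyGetD (a :: t) (-1) 0 =
        PySem.List.pyGetD (a :: t) (PySem.List.len (a :: t) - 1) 0 := by
      rw [PySem.List.pyGetD_neg_one _ _ (List.cons_ne_nil a t), PySem.List.len_eq]
      have hc : ((((a :: t).length : Int)) - 1) = (((a :: t).length - 1 : Nat) : Int) := by
        simp only [List.length_cons]; push_cast; omega
      rw [hc, PySem.List.pyGetD_natCast, List.getD_eq_getElem _ _ (by omega),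
        List.getLast_eq_getElem]
    rw [hlast]
    rw [PySem.List.foldl_ite_add_one]
    unfold get_z_with_star
    rw [PySem.List.foldl_append_ite_eq_filter]
    rw [PySem.List.len_eq]
    simp [List.countP_eq_length_filter]

-- per-line equality: A's line = B's line
lemma lineEq (orders : List (Int × Int)) (z : List Int) (i go : Int) :
    pvLineA orders z i go =
    pvLineBi (PySem.List.len z)
      (z.foldl (fun n x => if Int.gcd x (PySem.List.pyGetD z (-1) 0 + 1) = 1 then n + 1 else n) 0)
      (orders.foldl (fun d p => d.insert p.2 p.1) (PySem.Dict.empty : PySem.Dict Int Int))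
      (PySem.Set.ofList (orders.map (fun q => q.1)))
      (orders.foldl (fun d p => PySem.Dict.modify d p.2 [] (fun l => l ++ [" = &lt;" ++ PySem.Int.toStr p.1 ++ "&gt; "]))
        (PySem.Dict.empty : PySem.Dict Int (List String))) i go := by
  unfold pvLineA pvLineBi pvBodyB
  dsimp only []
  rw [fragsD, lastInsert]
  have hd0 : (PySem.Dict.empty : PySem.Dict Int Int).getD go 0 = 0 := by
    simp
  rw [hd0]
  unfold get_elements_for_group
  dsimp only []
  rw [lastMatch]
  rw [zsLen z]
  by_cases hz : z = []
  · subst hz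
    have h1 : PySem.List.pyRange 1 (PySem.List.len (get_z_with_star ([] : List Int)) + 1) = [] := rfl
    have h2 : PySem.List.pyRange 0 (PySem.List.len (get_z_with_star ([] : List Int))) = [] := rfl
    rw [h1, h2]
    simp only [List.foldl_nil]
    rw [bodyStr]
  · have hm : 0 < PySem.List.len z := by
      rw [PySem.List.len_eq]
      cases z with
      | nil => exact absurd rfl hz
      | cons a t => simp
    rw [PySem.List.len_eq (get_z_with_star z)]
    rw [setA]
    rw [PySem.List.pyRange_zero_natCast]
    rw [setB _ _ _ hm _ 0 1 pvSetEmpty (by rw [pow_zero])]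
    have hmemb : (PySem.Dict.mk orders).contains =
        (PySem.Set.ofList (orders.map (fun q => q.1))).contains :=
      funext fun pw => membEq orders pw
    rw [hmemb]
    simp only [List.length_map, List.length_range]
    rw [bodyStr]

-- A's step appends one line
lemma stepA_line (orders : List (Int × Int)) (z : List Int) (st : Int × String) (go : Int) :
    pvStepA orders z st go = (st.1 + 1, st.2 ++ pvLineA orders z (st.1 + 1) go) := by
  unfold pvStepA pvLineA
  dsimp only []
  rw [innerA]
  simp [String.append_assoc]

-- A's outer loop, unrolled against the enumerated reversed list
lemma outerA (orders : List (Int × Int)) (z : List Int) (l : List Int) :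
    ∀ (n : Nat) (acc : String),
      (l.foldl (pvStepA orders z) ((n : Int), acc)).2 =
      acc ++ PySem.Str.join "" ((PySem.List.enumerate l ((n : Int) + 1)).map (fun p => pvLineA orders z p.1 p.2)) := by
  induction l with
  | nil => intro n acc; simp [strJoin_nil]
  | cons x t ih =>
    intro n acc
    rw [List.foldl_cons, stepA_line]
    have hc : ((n : Int) + 1) = (((n + 1 : Nat)) : Int) := by push_cast; ring
    rw [hc, ih (n + 1)]
    rw [PySem.List.enumerate_cons, List.map_cons, strJoin_cons]
    simp [String.append_assoc]

-- B's memo wrapper returns the pure body under the cache invariant, preserving it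
lemma bodyCached_eq (m units : Int) (last : PySem.Dict Int Int) (keys : PySem.Set Int)
    (cache : PySem.Dict Int String) (o : Int)
    (hinv : ∀ k s, cache.get? k = some s → s = pvBodyB m units (last.getD k 0) keys) :
    (pvBodyCached m units last keys cache o).2 = pvBodyB m units (last.getD o 0) keys ∧
    (∀ k s, (pvBodyCached m units last keys cache o).1.get? k = some s →
      s = pvBodyB m units (last.getD k 0) keys) := by
  unfold pvBodyCached
  cases h : cache.get? o with
  | some s => exact ⟨hinv o s h, hinv⟩
  | none =>
    refine ⟨rfl, ?_⟩
    intro k s hk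
    rw [PySem.Dict.get?_insert] at hk
    by_cases hko : k = o
    · subst hko
      rw [if_pos rfl] at hk
      exact (Option.some.inj hk).symm
    · rw [if_neg hko] at hk
      exact hinv k s hk

-- B's line-building fold, under the cache invariant
lemma cacheFold (m units : Int) (last : PySem.Dict Int Int) (keys : PySem.Set Int)
    (frags : PySem.Dict Int (List String)) (n : Int) :
    ∀ (l : List (Int × Int)) (cache : PySem.Dict Int String) (acc : List String),
      (∀ k s, cache.get? k = some s → s = pvBodyB m units (last.getD k 0) keys) →
      (l.foldl (fun (st : PySem.Dict Int String × List String) q =>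
        ((pvBodyCached m units last keys st.1 q.2).1, st.2 ++ ["H<sub>" ++ PySem.Int.toStr (n - q.1) ++ "</sub>" ++ PySem.Str.join "" (frags.getD q.2 []) ++ "= " ++ (pvBodyCached m units last keys st.1 q.2).2 ++ " |H<sub>" ++ PySem.Int.toStr (n - q.1) ++ "</sub>| = " ++ PySem.Int.toStr q.2 ++ "\n"])
        ) (cache, acc)).2 =
      acc ++ l.map (fun q => pvLineBi m units last keys frags (n - q.1) q.2) := by
  intro l
  induction l with
  | nil => intro cache acc _; simp
  | cons q t ih =>
    intro cache acc hinv
    obtain ⟨hval, hinv'⟩ := bodyCached_eq m units last keys cache q.2 hinv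
    rw [List.foldl_cons]
    simp only [hval]
    rw [ih _ _ hinv']
    simp [pvLineBi, pvBodyB, String.append_assoc]

-- reversing a forward-indexed map = enumerating the reversed list
lemma enumRev {α : Type} (F : Int → α → String) (c : Int) :
    ∀ (xs : List α) (s : Int),
      ((PySem.List.enumerate xs s).map (fun q => F (c - q.1) q.2)).reverse =
      (PySem.List.enumerate xs.reverse (c - s - xs.length + 1)).map (fun q => F q.1 q.2) := by
  intro xs
  induction xs with
  | nil => intro s; simp [PySem.List.enumerate_nil]
  | cons x t ih =>
    intro s
    rw [PySem.List.enumerate_cons, List.map_cons, List.reverse_cons, ih (s + 1)]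
    rw [List.reverse_cons, PySem.List.enumerate_append]
    have h1 : c - (s + 1) - (t.length : Int) + 1 = c - s - ((x :: t).length : Int) + 1 := by
      simp only [List.length_cons]; push_cast; omega
    have h2 : c - s - ((x :: t).length : Int) + 1 + (t.reverse.length : Int) = c - s := by
      simp only [List.length_cons, List.length_reverse]; push_cast; omega
    rw [h1, h2]
    rw [show PySem.List.enumerate [x] (c - s) = [(c - s, x)] from by
      rw [PySem.List.enumerate_cons, PySem.List.enumerate_nil]]
    simp

-- ===== VERDICT (by name: the statement is the Claim_ definition above) =====
set_option maxHeartbeats 1000000 in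
theorem get_filled_groups_html_spec : Claim_equal_get_filled_groups_html := by
  intro groups orders z _
  unfold Spec_get_filled_groups_html
  have hA : get_filled_groups_html groups orders z =
      (groups.reverse.foldl (pvStepA orders z) ((((0 : Nat)) : Int), "")).2 := rfl
  rw [hA, outerA]
  unfold get_filled_groups_html_alt
  dsimp only []
  rw [cacheFold (PySem.List.len z)
      (z.foldl (fun n x => if Int.gcd x (PySem.List.pyGetD z (-1) 0 + 1) = 1 then n + 1 else n) 0)
      (orders.foldl (fun d p => d.insert p.2 p.1) PySem.Dict.empty)
      (PySem.Set.ofList (orders.map (fun q => q.1)))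
      (orders.foldl (fun d p => PySem.Dict.modify d p.2 [] (fun l => l ++ [" = &lt;" ++ PySem.Int.toStr p.1 ++ "&gt; "])) PySem.Dict.empty)
      (PySem.List.len groups)
      (PySem.List.enumerate groups 0) PySem.Dict.empty []
      (by intro k s h; rw [PySem.Dict.get?_empty] at h; exact absurd h (by simp))]
  rw [List.nil_append]
  rw [enumRev]
  have hc : PySem.List.len groups - 0 - (groups.length : Int) + 1 = 1 := by
    rw [PySem.List.len_eq]; ring
  rw [hc]
  rw [List.map_congr_left (fun p _ => lineEq orders z p.1 p.2)]
  simp
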